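-- pv_equiv track=rewrite | github.com/UAJOP/Pyhton-Projects | Pyhton_Projects/pythonProject/Ders Uygulaması Son.py | cumleDegis
-- ===== SOURCE A (Python) =====
-- def cumleDegis(cumle):
--     yeni_cumle=""
--     for i,item in enumerate(cumle):
--         if i%2==0:
--             yeni_cumle+=item.lower()
--
--         else:
--             yeni_cumle+=item.upper()
--
--     return  yeni_cumle
-- ===== SOURCE B (Python) =====
-- def cumleDegis(cumle):
--     it = iter(cumle)
--     parts = []
--     for a in it:
--         parts.append(a.lower())
--         b = next(it, '')
--         parts.append(b.upper())
--     return ''.join(parts)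
-- ===== Notes on version B (the rewrite author's own statement) =====
-- stated objective: alternative
-- what changed: Replaces the enumerate loop with an index-parity branch and string += by pairwise iterator consumption (lower the first char of each pair, upper the second) collected in a list and joined once.
import Mathlib
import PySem

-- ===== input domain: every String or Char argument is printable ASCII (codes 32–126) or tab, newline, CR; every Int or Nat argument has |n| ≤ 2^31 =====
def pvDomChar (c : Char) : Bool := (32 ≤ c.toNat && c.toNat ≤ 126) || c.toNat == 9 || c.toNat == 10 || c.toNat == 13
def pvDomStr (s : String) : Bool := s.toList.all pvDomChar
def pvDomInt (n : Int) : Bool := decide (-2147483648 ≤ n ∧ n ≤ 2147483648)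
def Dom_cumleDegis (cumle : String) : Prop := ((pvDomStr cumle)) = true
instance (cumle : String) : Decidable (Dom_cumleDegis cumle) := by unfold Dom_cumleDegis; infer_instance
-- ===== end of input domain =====

-- B replaces A's index-parity branch by pairwise iterator consumption joined once (objective: alternative).

-- ===== PORT A =====
-- A: for i,item in enumerate(cumle): even i → append item.lower(), odd i → append item.upper().
-- The accumulating string is carried as a List Char and wrapped with String.ofList at the end (exact on chars).
def cumleDegis (cumle : String) : String :=
  String.ofList
    ((PySem.List.enumerate cumle.toList 0).foldl
      (fun acc (p : Int × Char) =>
        if p.1 % 2 == 0 then acc ++ [PySem.Chars.lowerChar p.2]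
        else acc ++ [PySem.Chars.upperChar p.2]) [])

-- ===== PORT B =====
-- B: consume the characters two at a time (for a in it: append a.lower(); b = next(it,''); append b.upper());
-- each appended piece is a single character (or '' when the iterator is exhausted), so the parts list is a List Char.
def cumleDegisAltLoop : List Char → List Char
  | [] => []
  | [a] => [PySem.Chars.lowerChar a]   -- next(it,'') = '' : only a.lower() is appended
  | a :: b :: rest => PySem.Chars.lowerChar a :: PySem.Chars.upperChar b :: cumleDegisAltLoop rest

def cumleDegis_alt (cumle : String) : String :=
  String.ofList (cumleDegisAltLoop cumle.toList)

-- ===== PRECONDITION & SPEC =====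
def Spec_cumleDegis (cumle : String) (out : String) : Prop := out = cumleDegis_alt cumle
instance (cumle : String) (out : String) : Decidable (Spec_cumleDegis cumle out) := by unfold Spec_cumleDegis; infer_instance

-- ===== CLAIM (what is proved, stated in full; the proofs are below) =====
def Claim_equal_cumleDegis : Prop := ∀ (cumle : String), Dom_cumleDegis cumle → Spec_cumleDegis cumle (cumleDegis cumle)

-- ===== LEMMAS AND PROOFS =====

-- closed form of A's loop body indexed from an arbitrary start
def pvCase (s : Int) : List Char → List Char
  | [] => []
  | x :: xs => (if s % 2 == 0 then PySem.Chars.lowerChar x else PySem.Chars.upperChar x) :: pvCase (s + 1) xs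

theorem pvFoldl_enumerate (l : List Char) : ∀ (s : Int) (acc : List Char),
    (PySem.List.enumerate l s).foldl
      (fun acc (p : Int × Char) =>
        if p.1 % 2 == 0 then acc ++ [PySem.Chars.lowerChar p.2]
        else acc ++ [PySem.Chars.upperChar p.2]) acc = acc ++ pvCase s l := by
  induction l with
  | nil => intro s acc; simp [PySem.List.enumerate_nil, pvCase]
  | cons x xs ih =>
      intro s acc
      simp only [PySem.List.enumerate_cons, List.foldl_cons, ih, pvCase]
      by_cases h : s % 2 == 0 <;> simp [h]

theorem pvCase_even (l : List Char) : ∀ (s : Int), s % 2 = 0 → pvCase s l = cumleDegisAltLoop l := by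
  induction l using cumleDegisAltLoop.induct with
  | case1 => intro s _; rfl
  | case2 a =>
      intro s hs
      simp [pvCase, cumleDegisAltLoop, hs]
  | case3 a b rest ih =>
      intro s hs
      have h1 : (s + 1) % 2 ≠ 0 := by omega
      have h2 : (s + 2) % 2 = 0 := by omega
      simp only [pvCase, cumleDegisAltLoop]
      rw [ih (s + 1 + 1) (by omega)]
      simp [hs, h1]

-- ===== VERDICT (by name: the statement is the Claim_ definition above) =====
theorem cumleDegis_spec : Claim_equal_cumleDegis := by
  intro cumle _
  unfold Spec_cumleDegis cumleDegis cumleDegis_alt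
  rw [pvFoldl_enumerate, pvCase_even _ 0 (by norm_num)]
  rfl
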